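-- pv_equiv track=rewrite | github.com/sjgys6/2025 | AlphaGo-all/code/AlphaBetaActionFilter.py | count_live_n
-- ===== SOURCE A (Python) =====
-- def count_live_n(move, my_list, enemy_list, n=3):
--     """
--     统计move点落下后，形成的活n（如活三、活四）数量
--     """
--     directions = [(1,0),(0,1),(1,1),(1,-1)]
--     count = 0
--     for dx, dy in directions:
--         line = []
--         for i in range(-4, 5):
--             x, y = move[0] + dx*i, move[1] + dy*i
--             if (x, y) == move:
--                 line.append(1)
--             elif (x, y) in my_list:
--                 line.append(1)
--             elif (x, y) in enemy_list:
--                 line.append(2)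
--             else:
--                 line.append(0)
--         # 检查活n
--         for i in range(len(line)-n-1):
--             window = line[i:i+n+2]
--             if window[0]==0 and window[-1]==0 and window[1:-1]==[1]*n:
--                 count += 1
--     return count
-- ===== SOURCE B (Python) =====
-- def count_live_n(move, my_list, enemy_list, n=3):
--     """One-pass run scan: for each direction, classify the 9 cells on the fly and
--     track (run of my stones, whether the cell before the run is empty); count a
--     live-n whenever a run of exactly n closes on an empty cell on both sides."""
--     mine = set(my_list)
--     enem = set(enemy_list)
--     count = 0
--     for dx, dy in ((1, 0), (0, 1), (1, 1), (1, -1)):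
--         run = 0
--         openl = False
--         for i in range(-4, 5):
--             p = (move[0] + dx * i, move[1] + dy * i)
--             if p == move or p in mine:
--                 v = 1
--             elif p in enem:
--                 v = 2
--             else:
--                 v = 0
--             if v == 1:
--                 run += 1
--             else:
--                 if run == n and openl and v == 0:
--                     count += 1
--                 run = 0
--                 openl = v == 0
--     return count
-- ===== Notes on version B (the rewrite author's own statement) =====
-- stated objective: alternative
-- what changed: Replaces the sliding (n+2)-window slice scan over a materialised 9-cell line with a single fused pass that classifies each cell on the fly and tracks the current run of own stones plus an 'empty cell before the run' flag (counting when a run of exactly n closes on an empty cell), using set-based stone lookups; Pre_ excludes n <= -2, where A raises IndexError.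
-- intended difference: For n = -1 A's degenerate length-1 windows count single empty cells along the four lines (e.g. 32 on an empty board), while B returns 0, the intended value since no live-(-1) pattern exists. — e.g. on count_live_n((0, 0), [], [], -1): A returns 32, B returns 0
-- crash fix: For n <= -2 A raises IndexError (the window slice is empty, so window[0] fails); B's run scan never matches a negative n and returns 0. — e.g. on count_live_n((0, 0), [], [], -2): A raises IndexError, B returns 0
import Mathlib
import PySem

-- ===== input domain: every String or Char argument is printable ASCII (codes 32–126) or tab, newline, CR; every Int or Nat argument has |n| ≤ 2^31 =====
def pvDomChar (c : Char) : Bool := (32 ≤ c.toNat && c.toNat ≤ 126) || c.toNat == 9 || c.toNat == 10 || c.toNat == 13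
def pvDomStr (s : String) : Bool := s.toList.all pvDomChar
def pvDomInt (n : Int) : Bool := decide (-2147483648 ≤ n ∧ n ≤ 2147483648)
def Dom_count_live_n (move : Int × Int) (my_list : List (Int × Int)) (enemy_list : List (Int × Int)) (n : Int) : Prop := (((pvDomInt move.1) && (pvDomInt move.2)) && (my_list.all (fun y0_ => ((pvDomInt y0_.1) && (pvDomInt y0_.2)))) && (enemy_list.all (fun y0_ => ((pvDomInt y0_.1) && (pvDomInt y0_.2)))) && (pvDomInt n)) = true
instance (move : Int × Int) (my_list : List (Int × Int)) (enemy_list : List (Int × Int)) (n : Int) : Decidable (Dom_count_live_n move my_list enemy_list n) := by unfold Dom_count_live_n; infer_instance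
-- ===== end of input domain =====

-- B replaces A's sliding (n+2)-window slice scan over a materialised line with a single
-- fused pass per direction that classifies each cell on the fly and tracks the current
-- run of own stones plus an "empty cell before the run" flag, with set-based lookups.

-- ===== PORT A =====
def count_live_n (move : Int × Int) (my_list : List (Int × Int)) (enemy_list : List (Int × Int)) (n : Int) : Int :=
  let directions : List (Int × Int) := [(1, 0), (0, 1), (1, 1), (1, -1)]
  directions.foldl (fun count d =>
    let line : List Int :=
      (PySem.List.pyRange (-4) 5 1).foldl (fun line i =>
        let x := move.1 + d.1 * i
        let y := move.2 + d.2 * i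
        line ++ [if (x, y) = move then (1 : Int)
                 else if (x, y) ∈ my_list then 1
                 else if (x, y) ∈ enemy_list then 2
                 else 0]) []
    (PySem.List.pyRange 0 ((line.length : Int) - n - 1) 1).foldl (fun count i =>
      let window := PySem.List.slice line (some i) (some (i + n + 2))
      if PySem.List.pyGet? window 0 = some 0 ∧ PySem.List.pyGet? window (-1) = some 0 ∧
          PySem.List.slice window (some 1) (some (-1)) = List.replicate n.toNat 1
      then count + 1 else count) count) 0

-- ===== PORT B =====
def count_live_n_alt (move : Int × Int) (my_list : List (Int × Int)) (enemy_list : List (Int × Int)) (n : Int) : Int :=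
  let mine : PySem.Set (Int × Int) := PySem.Set.ofList my_list
  let enem : PySem.Set (Int × Int) := PySem.Set.ofList enemy_list
  ([((1 : Int), (0 : Int)), (0, 1), (1, 1), (1, -1)] : List (Int × Int)).foldl (fun count d =>
    ((PySem.List.pyRange (-4) 5 1).foldl (fun (st : Int × Bool × Int) i =>
      let p := (move.1 + d.1 * i, move.2 + d.2 * i)
      let v : Int := if p = move ∨ p ∈ mine then 1
                     else if p ∈ enem then 2 else 0
      if v = 1 then (st.1 + 1, st.2.1, st.2.2)
      else (0, decide (v = 0),
            if st.1 = n ∧ st.2.1 = true ∧ v = 0 then st.2.2 + 1 else st.2.2))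
      (0, false, count)).2.2) 0

-- ===== PRECONDITION & SPEC =====
-- Pre_ excludes n ≤ -2, where A raises IndexError (some window slice is empty, so window[0] fails).
def Pre_count_live_n (move : Int × Int) (my_list : List (Int × Int)) (enemy_list : List (Int × Int)) (n : Int) : Prop := -2 < n
instance (move : Int × Int) (my_list : List (Int × Int)) (enemy_list : List (Int × Int)) (n : Int) : Decidable (Pre_count_live_n move my_list enemy_list n) := by unfold Pre_count_live_n; infer_instance
def pvWitness_count_live_n : (Int × Int) × (List (Int × Int)) × (List (Int × Int)) × Int :=
  ((0, 0), [(1, 0), (2, 0)], [(3, 0)], 2)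

-- For n = -1 A's degenerate length-1 windows count single empty cells (A returns 32 on an
-- empty board), while B returns 0, the intended value: no live-(-1) pattern exists.
def D_count_live_n (move : Int × Int) (my_list : List (Int × Int)) (enemy_list : List (Int × Int)) (n : Int) : Prop := n = -1
instance (move : Int × Int) (my_list : List (Int × Int)) (enemy_list : List (Int × Int)) (n : Int) : Decidable (D_count_live_n move my_list enemy_list n) := by unfold D_count_live_n; infer_instance
def pvDiffWitness_count_live_n : (Int × Int) × (List (Int × Int)) × (List (Int × Int)) × Int :=
  ((0, 0), [], [], -1)
def pvDiffWitnessOut_count_live_n : Int × Int := (32, 0)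

-- For n ≤ -2 A raises IndexError (some window slice is empty, so window[0] fails); B returns 0.
def Raises_count_live_n (move : Int × Int) (my_list : List (Int × Int)) (enemy_list : List (Int × Int)) (n : Int) : Prop := n ≤ -2
instance (move : Int × Int) (my_list : List (Int × Int)) (enemy_list : List (Int × Int)) (n : Int) : Decidable (Raises_count_live_n move my_list enemy_list n) := by unfold Raises_count_live_n; infer_instance
def pvRaiseWitness_count_live_n : (Int × Int) × (List (Int × Int)) × (List (Int × Int)) × Int :=
  ((0, 0), [], [], -2)
def pvRaiseWitnessOut_count_live_n : Int := 0

def Spec_count_live_n (move : Int × Int) (my_list : List (Int × Int)) (enemy_list : List (Int × Int)) (n : Int) (out : Int) : Prop := ¬ D_count_live_n move my_list enemy_list n → out = count_live_n_alt move my_list enemy_list n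
instance (move : Int × Int) (my_list : List (Int × Int)) (enemy_list : List (Int × Int)) (n : Int) (out : Int) : Decidable (Spec_count_live_n move my_list enemy_list n out) := by unfold Spec_count_live_n; infer_instance

-- ===== CLAIM (what is proved, stated in full; the proofs are below) =====
def Claim_unchanged_count_live_n : Prop := ∀ (move : Int × Int) (my_list : List (Int × Int)) (enemy_list : List (Int × Int)) (n : Int), Dom_count_live_n move my_list enemy_list n → Pre_count_live_n move my_list enemy_list n → Spec_count_live_n move my_list enemy_list n (count_live_n move my_list enemy_list n)
def Claim_changed_count_live_n : Prop := Dom_count_live_n (pvDiffWitness_count_live_n.1) (pvDiffWitness_count_live_n.2.1) (pvDiffWitness_count_live_n.2.2.1) (pvDiffWitness_count_live_n.2.2.2) ∧ Pre_count_live_n (pvDiffWitness_count_live_n.1) (pvDiffWitness_count_live_n.2.1) (pvDiffWitness_count_live_n.2.2.1) (pvDiffWitness_count_live_n.2.2.2) ∧ D_count_live_n (pvDiffWitness_count_live_n.1) (pvDiffWitness_count_live_n.2.1) (pvDiffWitness_count_live_n.2.2.1) (pvDiffWitness_count_live_n.2.2.2) ∧ count_live_n (pvDiffWitness_count_live_n.1)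 (pvDiffWitness_count_live_n.2.1) (pvDiffWitness_count_live_n.2.2.1) (pvDiffWitness_count_live_n.2.2.2) = pvDiffWitnessOut_count_live_n.1 ∧ count_live_n_alt (pvDiffWitness_count_live_n.1) (pvDiffWitness_count_live_n.2.1) (pvDiffWitness_count_live_n.2.2.1) (pvDiffWitness_count_live_n.2.2.2) = pvDiffWitnessOut_count_live_n.2 ∧ pvDiffWitnessOut_count_live_n.1 ≠ pvDiffWitnessOut_count_live_n.2
def Claim_raises_count_live_n : Prop := (∀ (move : Int × Int) (my_list : List (Int × Int)) (enemy_list : List (Int × Int)) (n : Int), Dom_count_live_n move my_list enemy_list n → Raises_count_live_n move my_list enemy_list n → ¬ Pre_count_live_n move my_list enemy_list n) ∧ (Dom_count_live_n (pvRaiseWitness_count_live_n.1) (pvRaiseWitness_count_live_n.2.1) (pvRaiseWitness_count_live_n.2.2.1) (pvRaiseWitness_count_live_n.2.2.2) ∧ Raises_count_live_n (pvRaiseWitness_count_live_n.1) (pvRaiseWitness_count_live_n.2.1) (pvRaiseWitness_count_live_n.2.2.1) (pvRaiseWitness_count_live_n.2.2.2) ∧ count_live_n_alt (pvRaiseWitness_count_live_n.1)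 (pvRaiseWitness_count_live_n.2.1) (pvRaiseWitness_count_live_n.2.2.1) (pvRaiseWitness_count_live_n.2.2.2) = pvRaiseWitnessOut_count_live_n)

-- ===== LEMMAS AND PROOFS =====

/-- The live-n pattern: an empty cell, n own stones, an empty cell. -/
def pvPat (N : Nat) : List Int := 0 :: (List.replicate N 1 ++ [0])

/-- A's window condition at (integer) start index i, as a predicate. -/
abbrev pvCondA (N : Nat) (l : List Int) (i : Int) : Prop :=
  PySem.List.pyGet? (PySem.List.slice l (some i) (some (i + (N : Int) + 2))) 0 = some 0 ∧
  PySem.List.pyGet? (PySem.List.slice l (some i) (some (i + (N : Int) + 2))) (-1) = some 0 ∧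
  PySem.List.slice (PySem.List.slice l (some i) (some (i + (N : Int) + 2))) (some 1) (some (-1)) = List.replicate N 1

/-- Pattern occurrence ending at position k. -/
abbrev pvEnd (N : Nat) (l : List Int) (k : Nat) : Prop :=
  N + 1 ≤ k ∧ (l.take (k + 1)).drop (k - (N + 1)) = pvPat N

/-- Number of pattern occurrences in l (counted by end position). -/
def pvCnt (N : Nat) (l : List Int) : Int :=
  ((List.range l.length).countP (fun k => decide (pvEnd N l k)) : Int)

/-- Run/open-flag summary of the consumed prefix, read in reverse order. -/
def pvRB : List Int → Int × Bool
  | [] => (0, false)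
  | v :: m => if v = 1 then ((pvRB m).1 + 1, (pvRB m).2) else (0, decide (v = 0))

/-- B's per-cell state update. -/
def pvStep (n : Int) (st : Int × Bool × Int) (v : Int) : Int × Bool × Int :=
  if v = 1 then (st.1 + 1, st.2.1, st.2.2)
  else (0, decide (v = 0), if st.1 = n ∧ st.2.1 = true ∧ v = 0 then st.2.2 + 1 else st.2.2)

theorem pvPat_reverse (N : Nat) : (pvPat N).reverse = pvPat N := by
  simp [pvPat]

theorem pvRB_fst_nonneg (m : List Int) : 0 ≤ (pvRB m).1 := by
  induction m with
  | nil => simp [pvRB]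
  | cons v m ih => by_cases h : v = 1 <;> simp [pvRB, h] <;> omega

theorem pvRB_eq_iff (m : List Int) (N : Nat) :
    pvRB m = ((N : Int), true) ↔ m.take (N + 1) = List.replicate N 1 ++ [0] := by
  induction m generalizing N with
  | nil =>
      constructor
      · intro h; simp [pvRB, Prod.ext_iff] at h
      · intro h
        have := congrArg List.length h
        simp at this
  | cons v m ih =>
      by_cases hv : v = 1
      · subst hv
        cases N with
        | zero =>
            constructor
            · intro h
              simp [pvRB, Prod.ext_iff] at h
              have := pvRB_fst_nonneg m
              omega
            · intro h; simp [List.take_succ_cons] at h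
        | succ M =>
            have : ((1:Int) :: m).take (M + 1 + 1) = 1 :: m.take (M + 1) := by
              simp [List.take_succ_cons]
            rw [this]
            simp only [List.replicate_succ, List.cons_append]
            constructor
            · intro h
              simp [pvRB, Prod.ext_iff] at h
              obtain ⟨h1, h2⟩ := h
              have : pvRB m = ((M : Int), true) := by
                have : (pvRB m).1 = (M : Int) := by omega
                exact Prod.ext this h2
              simp [(ih M).mp this]
            · intro h
              simp only [List.cons.injEq] at h
              have := (ih M).mpr h.2
              simp [pvRB, this]
      · constructor
        · intro h
          simp [pvRB, hv, Prod.ext_iff] at h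
          obtain ⟨h1, h2⟩ := h
          have hN : N = 0 := by omega
          subst hN
          simp [List.take_succ_cons, h2]
        · intro h
          cases N with
          | zero =>
              simp [List.take_succ_cons] at h
              simp [pvRB, h]
          | succ M =>
              simp [List.take_succ_cons, List.replicate_succ] at h
              exact absurd h.1 hv

theorem pvWindow_trio (N : Nat) (w : List Int) (hw : w.length = N + 2) :
    (PySem.List.pyGet? w 0 = some 0 ∧ PySem.List.pyGet? w (-1) = some 0 ∧
      PySem.List.slice w (some 1) (some (-1)) = List.replicate N 1) ↔ w = pvPat N := by
  cases w with
  | nil => simp at hw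
  | cons x t =>
      rcases t.eq_nil_or_concat with rfl | ⟨y, z, rfl⟩
      · simp at hw
      · simp only [List.concat_eq_append] at *
        have hy : y.length = N := by simp at hw; omega
        have h0 : PySem.List.pyGet? (x :: (y ++ [z])) 0 = some x := by
          have := PySem.List.pyGet?_natCast (x :: (y ++ [z])) 0
          simpa using this
        have hlen : (x :: (y ++ [z])).length = N + 2 := hw
        have hlast : PySem.List.pyGet? (x :: (y ++ [z])) (-1) = some z := by
          simp [PySem.List.pyGet?, PySem.List.pyIdx?]
        have hsl : PySem.List.slice (x :: (y ++ [z])) (some 1) (some (-1)) = y := by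
          simp [PySem.List.slice, PySem.List.clampIdx, hy]
          have : ¬ ((N : Int) + 1 < 0) := by omega
          rw [if_neg this]
          simp [List.take_append_of_le_length, hy]
        rw [h0, hlast, hsl]
        constructor
        · rintro ⟨h1, h2, h3⟩
          simp only [Option.some.injEq] at h1 h2
          subst h1; subst h2; subst h3
          simp [pvPat]
        · intro h
          simp only [pvPat, List.cons.injEq] at h
          obtain ⟨rfl, h2⟩ := h
          have := List.append_inj' h2 (by simp)
          obtain ⟨rfl, h3⟩ := this
          simp only [List.cons.injEq] at h3
          simp [h3.1]

theorem pvCondA_iff (N : Nat) (l : List Int) (i : Nat) (h : i + (N + 2) ≤ l.length) :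
    pvCondA N l (i : Int) ↔ (l.drop i).take (N + 2) = pvPat N := by
  unfold pvCondA
  have hc : ((i : Int) + (N : Int) + 2) = ((i + (N + 2) : Nat) : Int) := by push_cast; ring
  rw [hc, PySem.List.slice_natCast]
  have he : i + (N + 2) - i = N + 2 := by omega
  rw [he]
  exact pvWindow_trio N _ (by simp; omega)

theorem pvFoldl_if_count {P : Nat → Prop} [DecidablePred P] (L : List Nat) (c : Int) :
    L.foldl (fun acc k => if P k then acc + 1 else acc) c
      = c + ((L.countP fun k => decide (P k)) : Int) := by
  induction L generalizing c with
  | nil => simp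
  | cons a L ih =>
      simp only [List.foldl_cons, List.countP_cons, ih]
      by_cases h : P a <;> simp [h] <;> ring

theorem pvCount_shift (N : Nat) (l : List Int) :
    ((List.range ((l.length : Int) - (N : Int) - 1).toNat).countP fun (i : Nat) => decide (pvCondA N l (i : Int)))
      = (List.range l.length).countP fun k => decide (pvEnd N l k) := by
  by_cases hL : l.length < N + 2
  · have h1 : ((l.length : Int) - (N : Int) - 1).toNat = 0 := by omega
    rw [h1]
    simp only [List.range_zero, List.countP_nil]
    symm
    apply List.countP_eq_zero.mpr
    intro k hk
    simp only [List.mem_range] at hk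
    simp only [decide_eq_true_eq]
    rintro ⟨hk1, -⟩
    omega
  · push_neg at hL
    have hsplit : l.length = (N + 1) + (l.length - (N + 1)) := by omega
    rw [show (List.range l.length) = List.range ((N+1) + (l.length - (N+1))) by rw [← hsplit],
        List.range_add, List.countP_append, List.countP_map]
    have hfst : (List.range (N+1)).countP (fun k => decide (pvEnd N l k)) = 0 := by
      apply List.countP_eq_zero.mpr
      intro k hk
      simp only [List.mem_range] at hk
      simp only [decide_eq_true_eq]
      rintro ⟨hk1, -⟩; omega
    rw [hfst]
    have hM : ((l.length : Int) - (N : Int) - 1).toNat = l.length - (N + 1) := by omega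
    rw [hM, Nat.zero_add]
    apply List.countP_congr
    intro i hi
    simp only [List.mem_range] at hi
    simp only [decide_eq_true_eq, Function.comp]
    rw [pvCondA_iff N l i (by omega)]
    unfold pvEnd
    constructor
    · intro hc
      refine ⟨by omega, ?_⟩
      rw [List.drop_take]
      have : N + 1 + i + 1 - (N + 1 + i - (N + 1)) = N + 2 := by omega
      have hidx : N + 1 + i - (N + 1) = i := by omega
      rw [hidx]
      have : N + 1 + i + 1 - i = N + 2 := by omega
      rw [this]
      exact hc
    · rintro ⟨-, hc⟩
      rw [List.drop_take] at hc
      have hidx : N + 1 + i - (N + 1) = i := by omega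
      rw [hidx] at hc
      have : N + 1 + i + 1 - i = N + 2 := by omega
      rw [this] at hc
      exact hc

theorem pvEnd_snoc_iff (N : Nat) (m : List Int) (v : Int) :
    pvEnd N (m.reverse ++ [v]) m.reverse.length ↔ (pvRB m = ((N : Int), true) ∧ v = 0) := by
  unfold pvEnd
  have hlen : (m.reverse ++ [v]).length = m.length + 1 := by simp
  have htake : (m.reverse ++ [v]).take (m.reverse.length + 1) = m.reverse ++ [v] := by
    apply List.take_of_length_le; simp
  rw [htake]
  rw [pvRB_eq_iff]
  simp only [List.length_reverse]
  constructor
  · rintro ⟨hN, heq⟩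
    have h2 : ((m.reverse ++ [v]).drop (m.length - (N + 1))).reverse = (pvPat N).reverse := by
      rw [heq]
    rw [List.reverse_drop] at h2
    have hc : (m.reverse ++ [v]).length - (m.length - (N + 1)) = N + 2 := by simp; omega
    rw [hc, pvPat_reverse] at h2
    have hrev : (m.reverse ++ [v]).reverse = v :: m := by simp
    rw [hrev] at h2
    rw [List.take_succ_cons] at h2
    unfold pvPat at h2
    simp only [List.cons.injEq] at h2
    exact ⟨h2.2, h2.1⟩
  · rintro ⟨htk, rfl⟩
    have hlb : N + 1 ≤ m.length := by
      have := congrArg List.length htk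
      simp at this
      omega
    refine ⟨hlb, ?_⟩
    have key : ((m.reverse ++ [0]).drop (m.length - (N + 1))).reverse = pvPat N := by
      rw [List.reverse_drop]
      have hc : (m.reverse ++ [(0:Int)]).length - (m.length - (N + 1)) = N + 2 := by simp; omega
      rw [hc]
      have hrev : (m.reverse ++ [(0:Int)]).reverse = 0 :: m := by simp
      rw [hrev, List.take_succ_cons, htk]
      rfl
    have := congrArg List.reverse key
    simpa [pvPat_reverse] using this

theorem pvCnt_snoc (N : Nat) (p : List Int) (v : Int) :
    pvCnt N (p ++ [v]) = pvCnt N p + (if pvEnd N (p ++ [v]) p.length then 1 else 0) := by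
  unfold pvCnt
  have h1 : (p ++ [v]).length = p.length + 1 := by simp
  rw [h1, List.range_succ, List.countP_append]
  have h2 : (List.range p.length).countP (fun k => decide (pvEnd N (p ++ [v]) k))
      = (List.range p.length).countP (fun k => decide (pvEnd N p k)) := by
    apply List.countP_congr
    intro k hk
    simp only [List.mem_range] at hk
    simp only [decide_eq_true_eq]
    unfold pvEnd
    rw [List.take_append_of_le_length (by omega)]
  rw [h2]
  have h3 : List.countP (fun k => decide (pvEnd N (p ++ [v]) k)) [p.length]
      = if pvEnd N (p ++ [v]) p.length then 1 else 0 := by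
    simp only [List.countP_singleton, decide_eq_true_eq]
  rw [h3]
  split <;> push_cast <;> ring

theorem pvBInv (N : Nat) (l : List Int) : ∀ (m : List Int) (c : Int),
    (l.foldl (pvStep (N : Int)) ((pvRB m).1, (pvRB m).2, c)).2.2
      = c + pvCnt N (m.reverse ++ l) - pvCnt N m.reverse := by
  induction l with
  | nil =>
      intro m c
      simp
  | cons v l' ih =>
      intro m c
      have hstep : pvStep (N : Int) ((pvRB m).1, (pvRB m).2, c) v
          = ((pvRB (v :: m)).1, (pvRB (v :: m)).2,
             c + (pvCnt N (m.reverse ++ [v]) - pvCnt N m.reverse)) := by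
        have hiff : pvEnd N (m.reverse ++ [v]) m.reverse.length
            ↔ ((pvRB m).1 = (N : Int) ∧ (pvRB m).2 = true ∧ v = 0) := by
          rw [pvEnd_snoc_iff]
          rw [Prod.ext_iff]
          tauto
        have hδ : pvCnt N (m.reverse ++ [v]) - pvCnt N m.reverse
            = if (pvRB m).1 = (N : Int) ∧ (pvRB m).2 = true ∧ v = 0 then 1 else 0 := by
          rw [pvCnt_snoc, List.length_reverse]
          simp only [List.length_reverse] at hiff
          rw [if_congr hiff rfl rfl]
          ring
        by_cases hv : v = 1
        · subst hv
          have hne : ¬ ((pvRB m).1 = (N : Int) ∧ (pvRB m).2 = true ∧ (1:Int) = 0) := by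
            rintro ⟨-, -, h⟩; omega
          rw [hδ, if_neg hne]
          simp [pvStep, pvRB]
        · rw [hδ]
          simp only [pvStep, pvRB, if_neg hv]
          split <;> simp
      rw [List.foldl_cons, hstep, ih (v :: m) _]
      rw [List.reverse_cons]
      rw [show m.reverse ++ [v] ++ l' = m.reverse ++ (v :: l') by simp]
      ring


theorem pvAfold (N : Nat) (l : List Int) (c : Int) :
    (PySem.List.pyRange 0 ((l.length : Int) - (N : Int) - 1) 1).foldl (fun count i =>
      if PySem.List.pyGet? (PySem.List.slice l (some i) (some (i + (N : Int) + 2))) 0 = some 0 ∧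
          PySem.List.pyGet? (PySem.List.slice l (some i) (some (i + (N : Int) + 2))) (-1) = some 0 ∧
          PySem.List.slice (PySem.List.slice l (some i) (some (i + (N : Int) + 2))) (some 1) (some (-1))
            = List.replicate ((N : Int)).toNat 1
      then count + 1 else count) c = c + pvCnt N l := by
  rw [PySem.List.pyRange_one, List.foldl_map]
  have hcongr : ∀ (acc : Int), ∀ k ∈ List.range (((l.length : Int) - (N : Int) - 1) - 0).toNat,
      (if PySem.List.pyGet? (PySem.List.slice l (some ((0:Int) + (k:Int))) (some ((0:Int) + (k:Int) + (N : Int) + 2))) 0 = some 0 ∧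
          PySem.List.pyGet? (PySem.List.slice l (some ((0:Int) + (k:Int))) (some ((0:Int) + (k:Int) + (N : Int) + 2))) (-1) = some 0 ∧
          PySem.List.slice (PySem.List.slice l (some ((0:Int) + (k:Int))) (some ((0:Int) + (k:Int) + (N : Int) + 2))) (some 1) (some (-1))
            = List.replicate ((N : Int)).toNat 1
        then acc + 1 else acc)
      = (if pvCondA N l (k : Int) then acc + 1 else acc) := by
    intro acc k hk
    simp only [pvCondA, zero_add, Int.toNat_natCast]
  rw [PySem.List.foldl_congr_mem _ _ _ _ hcongr]
  rw [pvFoldl_if_count]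
  unfold pvCnt
  rw [← pvCount_shift]
  norm_num

theorem pvBfold (N : Nat) (g : Int → Int) (c : Int) :
    ((PySem.List.pyRange (-4) 5 1).foldl (fun (st : Int × Bool × Int) i =>
        if g i = 1 then (st.1 + 1, st.2.1, st.2.2)
        else (0, decide (g i = 0),
              if st.1 = (N : Int) ∧ st.2.1 = true ∧ g i = 0 then st.2.2 + 1 else st.2.2))
      (0, false, c)).2.2 = c + pvCnt N ((PySem.List.pyRange (-4) 5 1).map g) := by
  have hbody : (fun (st : Int × Bool × Int) i =>
        if g i = 1 then (st.1 + 1, st.2.1, st.2.2)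
        else (0, decide (g i = 0),
              if st.1 = (N : Int) ∧ st.2.1 = true ∧ g i = 0 then st.2.2 + 1 else st.2.2))
      = fun st i => pvStep (N : Int) st (g i) := rfl
  rw [hbody, ← List.foldl_map]
  have h0 : ((0 : Int), false, c) = ((pvRB []).1, (pvRB []).2, c) := rfl
  rw [h0, pvBInv]
  simp only [List.nil_append, List.reverse_nil, pvCnt, List.length_nil, List.range_zero,
    List.countP_nil, Nat.cast_zero, sub_zero]
  rfl

-- ===== VERDICT (by name: the statement is the Claim_ definition above) =====
theorem count_live_n_spec : Claim_unchanged_count_live_n := by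
  intro move my_list enemy_list n _ hpre
  unfold Spec_count_live_n
  intro hnd
  unfold Pre_count_live_n at hpre
  unfold D_count_live_n at hnd
  have hpre : 0 ≤ n := by omega
  lift n to ℕ using hpre with N
  unfold count_live_n count_live_n_alt
  simp only []
  apply PySem.List.foldl_congr_mem
  intro c d _
  rw [PySem.List.foldl_append_singleton_eq_map]
  rw [List.nil_append]
  rw [pvAfold, pvBfold]
  congr 1
  congr 1
  apply List.map_congr_left
  intro i _
  by_cases h1 : (move.1 + d.1 * i, move.2 + d.2 * i) = move <;>
    by_cases h2 : (move.1 + d.1 * i, move.2 + d.2 * i) ∈ my_list <;>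
      by_cases h3 : (move.1 + d.1 * i, move.2 + d.2 * i) ∈ enemy_list <;>
        simp [h1, h2, h3, PySem.Set.mem_ofList]

theorem count_live_n_changed : Claim_changed_count_live_n := by
  unfold Claim_changed_count_live_n
  decide

@[simp] theorem count_live_n_raises : Claim_raises_count_live_n := by
  unfold Claim_raises_count_live_n
  exact ⟨fun move my_list enemy_list n _ hr hp => by
    unfold Raises_count_live_n at hr; unfold Pre_count_live_n at hp; omega,
    by decide⟩
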